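-- pv_equiv track=rewrite | github.com/pypi-data/pypi-mirror-295 | packages/LabelSIG/LabelSIG-2.0.9.tar.gz/LabelSIG-2.0.9/labelsig/utils/utils_general.py | get_annotation_ranges
-- ===== SOURCE A (Python) =====
-- def get_annotation_ranges(comprehensive_category_seq):
--     """
--     根据 comprehensive_category_seq 返回每个标注值的范围索引列表。
--
--     Args:
--         comprehensive_category_seq (list): 包含标注值的序列。
--
--     Returns:
--         dict: 以标注值为键，范围索引 (start_idx, end_idx) 的列表为值的字典。
--     """
--     if not comprehensive_category_seq:
--         return {}
--
--     annotation_ranges = {}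
--     start_idx = 0
--
--     for i in range(1, len(comprehensive_category_seq)):
--         # 当元素发生变化时，或到了序列的最后一个元素时
--         if comprehensive_category_seq[i] != comprehensive_category_seq[start_idx]:
--             # 获取当前元素的值
--             current_value = comprehensive_category_seq[start_idx]
--
--             # 保存当前元素的范围 (start_idx, i - 1)
--             if current_value not in annotation_ranges:
--                 annotation_ranges[current_value] = []
--             annotation_ranges[current_value].append((start_idx, i - 1))
--
--             # 更新 start_idx 为当前元素的位置
--             start_idx = i
--
--     # 处理最后一段
--     current_value = comprehensive_category_seq[start_idx]
--     if current_value not in annotation_ranges: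
--         annotation_ranges[current_value] = []
--     annotation_ranges[current_value].append((start_idx, len(comprehensive_category_seq) - 1))
--
--     return annotation_ranges
-- ===== SOURCE B (Python) =====
-- def get_annotation_ranges(comprehensive_category_seq):
--     """Build an inverted index value -> all positions, then split each
--     position list into maximal runs of consecutive integers."""
--     positions = {}
--     for i, v in enumerate(comprehensive_category_seq):
--         positions[v] = positions.get(v, []) + [i]
--     result = {}
--     for v, idxs in positions.items():
--         ranges = []
--         start = prev = idxs[0]
--         for j in idxs[1:]:
--             if j != prev + 1:
--                 ranges.append((start, prev))
--                 start = j
--             prev = j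
--         ranges.append((start, prev))
--         result[v] = ranges
--     return result
-- ===== Notes on version B (the rewrite author's own statement) =====
-- stated objective: alternative
-- what changed: Instead of scanning for run boundaries with a trailing start_idx pointer and a duplicated final-segment block, B first builds an inverted index mapping each value to the sorted list of ALL its positions, then splits each position list into maximal runs of consecutive integers to recover the (start, end) ranges.
import Mathlib
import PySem

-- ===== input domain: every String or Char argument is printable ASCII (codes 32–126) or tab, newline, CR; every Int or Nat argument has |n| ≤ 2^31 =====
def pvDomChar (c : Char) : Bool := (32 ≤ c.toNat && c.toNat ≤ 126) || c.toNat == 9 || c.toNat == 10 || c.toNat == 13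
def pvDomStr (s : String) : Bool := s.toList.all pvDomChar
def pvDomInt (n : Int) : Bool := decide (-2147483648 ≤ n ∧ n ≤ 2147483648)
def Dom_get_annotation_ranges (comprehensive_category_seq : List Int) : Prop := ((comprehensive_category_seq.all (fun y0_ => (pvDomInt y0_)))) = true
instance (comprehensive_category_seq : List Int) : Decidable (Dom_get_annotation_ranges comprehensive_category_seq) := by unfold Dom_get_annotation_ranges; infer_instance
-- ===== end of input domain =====

-- B replaces A's boundary-scanning loop (trailing start_idx pointer plus a duplicated
-- final-segment block) by a different data structure: an inverted index value -> list of all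
-- positions, whose per-value lists are then split into maximal consecutive-integer runs.

-- ===== PORT A =====
def get_annotation_ranges (comprehensive_category_seq : List Int) : List (Int × List (Int × Int)) :=
  if comprehensive_category_seq = [] then []
  else
    let st := (PySem.List.pyRange 1 (PySem.List.len comprehensive_category_seq) 1).foldl
      (fun (s : PySem.Dict Int (List (Int × Int)) × Int) i =>
        if PySem.List.pyGetD comprehensive_category_seq i 0 ≠
            PySem.List.pyGetD comprehensive_category_seq s.2 0 then
          let v := PySem.List.pyGetD comprehensive_category_seq s.2 0
          let d := if s.1.contains v then s.1 else s.1.insert v []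
          (d.modify v [] (fun l => l ++ [(s.2, i - 1)]), i)
        else s)
      (PySem.Dict.empty, 0)
    let v := PySem.List.pyGetD comprehensive_category_seq st.2 0
    let d := if st.1.contains v then st.1 else st.1.insert v []
    (d.modify v [] (fun l => l ++ [(st.2, PySem.List.len comprehensive_category_seq - 1)])).items

-- ===== PORT B =====
-- split a (sorted) position list into maximal runs of consecutive integers (Source B's inner loop)
def pvSplit (idxs : List Int) : List (Int × Int) :=
  match idxs with
  | [] => []   -- unreachable in B: every stored position list is nonempty
  | j0 :: rest =>
      let st := rest.foldl
        (fun (s : List (Int × Int) × Int × Int) j =>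
          if j ≠ s.2.2 + 1 then (s.1 ++ [(s.2.1, s.2.2)], j, j) else (s.1, s.2.1, j))
        ([], j0, j0)
      st.1 ++ [(st.2.1, st.2.2)]

def get_annotation_ranges_alt (comprehensive_category_seq : List Int) : List (Int × List (Int × Int)) :=
  let positions := (PySem.List.enumerate comprehensive_category_seq 0).foldl
      (fun d p => d.modify p.2 [] (fun l => l ++ [p.1])) PySem.Dict.empty
  (positions.items.foldl
      (fun (r : PySem.Dict Int (List (Int × Int))) p => r.insert p.1 (pvSplit p.2))
      PySem.Dict.empty).items

-- ===== PRECONDITION & SPEC =====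
def Spec_get_annotation_ranges (comprehensive_category_seq : List Int) (out : List (Int × List (Int × Int))) : Prop := out = get_annotation_ranges_alt comprehensive_category_seq
instance (comprehensive_category_seq : List Int) (out : List (Int × List (Int × Int))) : Decidable (Spec_get_annotation_ranges comprehensive_category_seq out) := by unfold Spec_get_annotation_ranges; infer_instance

-- ===== CLAIM (what is proved, stated in full; the proofs are below) =====
def Claim_equal_get_annotation_ranges : Prop := ∀ (comprehensive_category_seq : List Int), Dom_get_annotation_ranges comprehensive_category_seq → Spec_get_annotation_ranges comprehensive_category_seq (get_annotation_ranges comprehensive_category_seq)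

-- ===== LEMMAS AND PROOFS =====

-- maximal runs of consecutive equal elements, as (value, run length ≥ 1)
def pvRuns : List Int → List (Int × Nat)
  | [] => []
  | x :: rest =>
      (x, 1 + (rest.takeWhile (fun y => y == x)).length) ::
        pvRuns (rest.dropWhile (fun y => y == x))
  termination_by l => l.length
  decreasing_by
    exact Nat.lt_succ_of_le (List.length_dropWhile_le _ _)

-- dict update shared by both sides: append p to the list stored at v (creating [] first if absent)
def addR (d : PySem.Dict Int (List (Int × Int))) (v : Int) (p : Int × Int) :
    PySem.Dict Int (List (Int × Int)) :=
  (if d.contains v then d else d.insert v []).modify v [] (fun l => l ++ [p])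

-- A's loop body
def fA (xs : List Int) (s : PySem.Dict Int (List (Int × Int)) × Int) (i : Int) :
    PySem.Dict Int (List (Int × Int)) × Int :=
  if PySem.List.pyGetD xs i 0 ≠ PySem.List.pyGetD xs s.2 0 then
    (addR s.1 (PySem.List.pyGetD xs s.2 0) (s.2, i - 1), i)
  else s

-- A's final-segment block
def finalA (xs : List Int) (s : PySem.Dict Int (List (Int × Int)) × Int) :
    PySem.Dict Int (List (Int × Int)) :=
  addR s.1 (PySem.List.pyGetD xs s.2 0) (s.2, PySem.List.len xs - 1)

-- run-level accumulation on the A side: close the run (v, k) starting at the current offset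
def gB (s : PySem.Dict Int (List (Int × Int)) × Int) (r : Int × Nat) :
    PySem.Dict Int (List (Int × Int)) × Int :=
  (addR s.1 r.1 (s.2, s.2 + (r.2 : Int) - 1), s.2 + (r.2 : Int))

lemma A_unfold (xs : List Int) (h : xs ≠ []) :
    get_annotation_ranges xs =
      (finalA xs ((PySem.List.pyRange 1 (PySem.List.len xs) 1).foldl (fA xs)
        (PySem.Dict.empty, 0))).items := by
  simp only [get_annotation_ranges, if_neg h]
  rfl

-- merging a run of length k in front of a run list
def consRun (v : Int) (k : Nat) : List (Int × Nat) → List (Int × Nat)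
  | [] => [(v, k)]
  | (w, l) :: rs => if w = v then (v, k + l) :: rs else (v, k) :: (w, l) :: rs

lemma pvRuns_cons (x : Int) (rest : List Int) :
    pvRuns (x :: rest) = consRun x 1 (pvRuns rest) := by
  cases rest with
  | nil => simp [pvRuns, consRun]
  | cons y r2 =>
    by_cases h : y = x
    · subst h
      rw [pvRuns, pvRuns]
      simp [consRun, List.takeWhile, List.dropWhile]
      omega
    · have hb : (y == x) = false := by simp [h]
      rw [pvRuns, pvRuns]
      simp [consRun, List.takeWhile, List.dropWhile, hb, h]
      rw [pvRuns]

lemma consRun_merge (v : Int) (k : Nat) (rs : List (Int × Nat)) :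
    consRun v k (consRun v 1 rs) = consRun v (k + 1) rs := by
  cases rs with
  | nil => simp [consRun]
  | cons p rs' =>
    obtain ⟨w, l⟩ := p
    by_cases h : w = v <;> simp [consRun, h]
    ring

lemma getD_of_drop (xs : List Int) (j : Nat) (y : Int) (l : List Int)
    (h : xs.drop j = y :: l) : PySem.List.pyGetD xs (j : Int) 0 = y := by
  have hj : j < xs.length := by
    by_contra hc
    rw [List.drop_eq_nil_of_le (by omega)] at h
    simp at h
  have hx : xs[j] = y := by
    have h0 : (xs.drop j)[0]'(by rw [h]; simp) = y := by simp [h]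
    rw [List.getElem_drop] at h0
    simpa using h0
  rw [PySem.List.pyGetD_natCast]
  simp [List.getD, hj, hx]

-- A's element loop, regrouped run by run
lemma main_lemma (xs : List Int) (tail : List Int) :
    ∀ (v : Int) (k : Nat) (d : PySem.Dict Int (List (Int × Int))) (start : Nat),
      1 ≤ k → xs.drop start = List.replicate k v ++ tail →
      start + k + tail.length = xs.length →
      finalA xs ((PySem.List.pyRange (((start + k : Nat) : Int)) (PySem.List.len xs) 1).foldl
          (fA xs) (d, (start : Int)))
        = ((consRun v k (pvRuns tail)).foldl gB (d, (start : Int))).1 := by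
  induction tail with
  | nil =>
    intro v k d start hk hdrop hlen
    have hlen' : start + k = xs.length := by simpa using hlen
    have hget : PySem.List.pyGetD xs (start : Int) 0 = v := by
      apply getD_of_drop xs start v (List.replicate (k - 1) v)
      rw [hdrop]
      simp only [List.append_nil]
      rw [show List.replicate k v = v :: List.replicate (k - 1) v by
        rw [← List.replicate_succ]; congr 1; omega]
    have hn : (PySem.List.len xs) = ((start + k : Nat) : Int) := by
      simp [PySem.List.len_eq]; omega
    rw [hn, PySem.List.pyRange_one_eq_nil le_rfl]
    simp only [List.foldl_nil, pvRuns, consRun, List.foldl_cons, gB, finalA, hget, hn]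
    norm_num
  | cons t rest ih =>
    intro v k d start hk hdrop hlen
    have hdropik : xs.drop (start + k) = t :: rest := by
      have : xs.drop (start + k) = (xs.drop start).drop k := by
        rw [List.drop_drop]
      rw [this, hdrop]
      simp
    have hgs : PySem.List.pyGetD xs (start : Int) 0 = v := by
      apply getD_of_drop xs start v (List.replicate (k - 1) v ++ t :: rest)
      rw [hdrop]
      rw [show List.replicate k v = v :: List.replicate (k - 1) v by
        rw [← List.replicate_succ]; congr 1; omega]
      simp
    have hgi : PySem.List.pyGetD xs ((start : Int) + (k : Int)) 0 = t := by
      have := getD_of_drop xs (start + k) t rest hdropik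
      simpa using this
    have hik : ((start + k : Nat) : Int) < PySem.List.len xs := by
      have := congrArg List.length hdropik
      simp at this
      simp [PySem.List.len_eq]
      omega
    rw [PySem.List.pyRange_one_cons hik, List.foldl_cons]
    by_cases heq : t = v
    · -- element continues the current run: A's state is unchanged
      have hbody : fA xs (d, (start : Int)) (((start + k : Nat) : Int)) = (d, (start : Int)) := by
        simp [fA, hgi, hgs, heq]
      rw [hbody]
      have hdrop' : xs.drop start = List.replicate (k + 1) v ++ rest := by
        rw [hdrop, heq, List.replicate_succ' (n := k)]
        simp
      have hih := ih v (k + 1) d start (by omega) hdrop' (by simp at hlen ⊢; omega)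
      rw [show ((start + k : Nat) : Int) + 1 = ((start + (k + 1) : Nat) : Int) by
        push_cast; ring]
      rw [hih, pvRuns_cons, heq, consRun_merge]
    · -- element starts a new run: A closes the run (start, start+k-1)
      have hbody : fA xs (d, (start : Int)) (((start + k : Nat) : Int))
          = (addR d v ((start : Int), ((start + k : Nat) : Int) - 1), ((start + k : Nat) : Int)) := by
        simp [fA, hgi, hgs, heq]
      rw [hbody]
      have hih := ih t 1 (addR d v ((start : Int), ((start + k : Nat) : Int) - 1)) (start + k)
        le_rfl (by simpa using hdropik) (by simp at hlen ⊢; omega)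
      rw [show ((start + k : Nat) : Int) + 1 = ((start + k + 1 : Nat) : Int) by push_cast; ring]
      rw [hih, ← pvRuns_cons]
      -- evaluate the first step of the run-level fold on the run (v, k)
      have hhead : consRun v k (pvRuns (t :: rest))
          = (v, k) :: pvRuns (t :: rest) := by
        rw [pvRuns_cons]
        cases hrs : pvRuns rest with
        | nil => simp [consRun, heq]
        | cons p rs' =>
          obtain ⟨w, l⟩ := p
          by_cases hw : w = t <;> simp [consRun, hw, heq]
      rw [hhead, List.foldl_cons, gB]
      push_cast
      ring_nf

-- A as a run-level fold
lemma A_runs (xs : List Int) (h : xs ≠ []) :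
    get_annotation_ranges xs = ((pvRuns xs).foldl gB (PySem.Dict.empty, 0)).1.items := by
  obtain ⟨x, rest, rfl⟩ := List.exists_cons_of_ne_nil h
  rw [A_unfold _ h]
  have hml := main_lemma (x :: rest) rest x 1 PySem.Dict.empty 0 le_rfl (by simp)
    (by simp; omega)
  simp only [Nat.cast_zero, Nat.cast_one, zero_add] at hml
  rw [hml, ← pvRuns_cons]

-- ---- structural facts about pvRuns ----

lemma pvRuns_flatten : ∀ xs : List Int,
    (pvRuns xs).flatMap (fun p => List.replicate p.2 p.1) = xs := by
  intro xs
  induction xs using pvRuns.induct with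
  | case1 => simp [pvRuns]
  | case2 x rest ih =>
    rw [pvRuns]
    simp only [List.flatMap_cons, ih]
    have ht : rest.takeWhile (fun y => y == x)
        = List.replicate ((rest.takeWhile (fun y => y == x)).length) x := by
      apply List.eq_replicate_of_mem
      intro b hb
      have := List.mem_takeWhile_imp hb
      simpa using this
    calc List.replicate (1 + (rest.takeWhile (fun y => y == x)).length) x
          ++ rest.dropWhile (fun y => y == x)
        = x :: (List.replicate ((rest.takeWhile (fun y => y == x)).length) x
            ++ rest.dropWhile (fun y => y == x)) := by
          rw [Nat.add_comm, List.replicate_succ]; simp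
      _ = x :: (rest.takeWhile (fun y => y == x) ++ rest.dropWhile (fun y => y == x)) := by
          rw [← ht]
      _ = x :: rest := by rw [List.takeWhile_append_dropWhile]

lemma pvRuns_pos : ∀ (xs : List Int) (p : Int × Nat), p ∈ pvRuns xs → 1 ≤ p.2 := by
  intro xs
  induction xs using pvRuns.induct with
  | case1 => simp [pvRuns]
  | case2 x rest ih =>
    intro p hp
    rw [pvRuns] at hp
    rcases List.mem_cons.mp hp with h | h
    · subst h; simp
    · exact ih p h

lemma pvRuns_chain : ∀ xs : List Int,
    (pvRuns xs).IsChain (fun a b => a.1 ≠ b.1) := by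
  intro xs
  induction xs using pvRuns.induct with
  | case1 => rw [pvRuns]; exact .nil
  | case2 x rest ih =>
    rw [pvRuns]
    cases hrest : rest.dropWhile (fun y => y == x) with
    | nil =>
      rw [show pvRuns ([] : List Int) = [] by rw [pvRuns]]
      exact .singleton _
    | cons y l =>
      have hy : ¬ (y == x) = true := by
        have := List.head?_dropWhile_not (fun y => y == x) rest
        rw [hrest] at this
        simpa using this
      rw [hrest] at ih
      rw [show pvRuns (y :: l) = (y, 1 + (l.takeWhile (fun z => z == y)).length)
          :: pvRuns (l.dropWhile (fun z => z == y)) by rw [pvRuns]] at ih ⊢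
      refine .cons ih ?_
      intro q hq
      simp only [List.head?_cons, Option.mem_def, Option.some.injEq] at hq
      subst hq
      intro h
      exact hy (beq_iff_eq.mpr (show x = y from h).symm)

-- ---- per-value index and range lists determined by the run decomposition ----

def intsFrom (s k : Nat) : List Int := (List.range k).map (fun j => ((s + j : Nat) : Int))

def idxsOf (v : Int) : List (Int × Nat) → Nat → List Int
  | [], _ => []
  | (u, k) :: rs, off => (if u = v then intsFrom off k else []) ++ idxsOf v rs (off + k)

def rngsOf (v : Int) : List (Int × Nat) → Nat → List (Int × Int)
  | [], _ => []
  | (u, k) :: rs, off =>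
      (if u = v then [((off : Int), (off : Int) + (k : Int) - 1)] else []) ++ rngsOf v rs (off + k)

lemma intsFrom_succ (s k : Nat) : intsFrom s (k + 1) = ((s : Int)) :: intsFrom (s + 1) k := by
  unfold intsFrom
  rw [List.range_succ_eq_map]
  simp only [List.map_cons, List.map_map]
  refine List.cons_eq_cons.mpr ⟨by simp, ?_⟩
  apply List.map_congr_left
  intro a _
  simp only [Function.comp_apply]
  omega

-- ---- A side: getD and keys of the run-level fold ----

lemma addR_getD (d : PySem.Dict Int (List (Int × Int))) (u v : Int) (p : Int × Int) :
    (addR d u p).getD v [] = if v = u then d.getD v [] ++ [p] else d.getD v [] := by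
  unfold addR
  by_cases hcu : d.contains u = true
  · simp only [hcu, if_true]
    rw [PySem.Dict.getD_modify]
    by_cases h : v = u
    · subst h; simp
    · simp [h]
  · have hcu' : d.contains u = false := by simpa using hcu
    rw [if_neg (by simp [hcu'])]
    rw [PySem.Dict.getD_modify]
    by_cases h : v = u
    · subst h
      simp [PySem.Dict.getD_of_not_contains d [] hcu']
    · simp [h, PySem.Dict.getD_insert]

lemma addR_keys (d : PySem.Dict Int (List (Int × Int))) (u : Int) (p : Int × Int) :
    (addR d u p).keys = PySem.Set.add d.keys u := by
  unfold addR
  by_cases hcu : d.contains u = true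
  · simp only [hcu, if_true]
    rw [PySem.Dict.keys_modify, PySem.Dict.keys_insert_of_contains d _ hcu,
      PySem.Set.add_of_mem ((PySem.Dict.contains_iff_mem_keys d u).mp hcu)]
  · have hcu' : d.contains u = false := by simpa using hcu
    rw [if_neg (by simp [hcu'])]
    rw [PySem.Dict.keys_modify, PySem.Dict.keys_insert_of_contains _ _
      (PySem.Dict.contains_insert_self d u []),
      PySem.Dict.keys_insert_of_not_contains d _ hcu',
      PySem.Set.add_of_not_mem]
    intro hm
    apply hcu
    exact (PySem.Dict.contains_iff_mem_keys d u).mpr hm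

lemma gBfold_getD (v : Int) : ∀ (rs : List (Int × Nat)) (d : PySem.Dict Int (List (Int × Int)))
    (off : Nat), (rs.foldl gB (d, (off : Int))).1.getD v [] = d.getD v [] ++ rngsOf v rs off := by
  intro rs
  induction rs with
  | nil => intro d off; simp [rngsOf]
  | cons q rs ih =>
    intro d off
    obtain ⟨u, k⟩ := q
    simp only [List.foldl_cons, gB]
    rw [show ((off : Int) + (k : Int)) = ((off + k : Nat) : Int) by push_cast; ring]
    rw [ih]
    rw [addR_getD]
    simp only [rngsOf]
    by_cases h : v = u
    · subst h
      simp
    · have h' : ¬ u = v := fun hh => h hh.symm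
      simp [h, h']

lemma gBfold_keys : ∀ (rs : List (Int × Nat)) (d : PySem.Dict Int (List (Int × Int))) (off : Nat),
    (rs.foldl gB (d, (off : Int))).1.keys = PySem.Set.update d.keys (rs.map (fun p => p.1)) := by
  intro rs
  induction rs with
  | nil => intro d off; simp [PySem.Set.update]
  | cons q rs ih =>
    intro d off
    obtain ⟨u, k⟩ := q
    simp only [List.foldl_cons, gB, List.map_cons]
    rw [show ((off : Int) + (k : Int)) = ((off + k : Nat) : Int) by push_cast; ring]
    rw [ih, addR_keys, PySem.Set.update_cons]

-- ---- B side: the positions dict ----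

def pvPos (xs : List Int) : PySem.Dict Int (List Int) :=
  (PySem.List.enumerate xs 0).foldl (fun d p => d.modify p.2 [] (fun l => l ++ [p.1]))
    PySem.Dict.empty

lemma pvPos_getD (xs : List Int) (v : Int) :
    (pvPos xs).getD v [] =
      (((PySem.List.enumerate xs 0).map Prod.swap).filter (fun p => p.1 == v)).map
        (fun p => p.2) := by
  unfold pvPos
  rw [show ((PySem.List.enumerate xs 0).foldl
        (fun d p => d.modify p.2 [] (fun l => l ++ [p.1])) PySem.Dict.empty)
      = ((PySem.List.enumerate xs 0).map Prod.swap).foldl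
        (fun d p => d.modify p.1 [] (fun l => l ++ [p.2])) PySem.Dict.empty by
    rw [List.foldl_map]
    rfl]
  rw [PySem.Dict.getD_foldl_modify_append]
  simp

lemma pvPos_keys (xs : List Int) : (pvPos xs).keys = PySem.Set.ofList xs := by
  unfold pvPos
  rw [PySem.Dict.keys_foldl_modify_key (PySem.List.enumerate xs 0) (fun p => p.2) []
    (fun _ p => fun l => l ++ [p.1]) PySem.Dict.empty]
  rw [PySem.Dict.keys_empty, PySem.List.map_snd_enumerate, PySem.Set.update_nil_left]

lemma enum_rep (v u : Int) : ∀ (k : Nat) (s : Nat),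
    ((((PySem.List.enumerate (List.replicate k u) (s : Int))).map Prod.swap).filter
        (fun p => p.1 == v)).map (fun p => p.2)
      = if u = v then intsFrom s k else [] := by
  intro k
  induction k with
  | zero => intro s; simp [intsFrom, PySem.List.enumerate_nil]
  | succ k ih =>
    intro s
    rw [List.replicate_succ, PySem.List.enumerate_cons]
    rw [show ((s : Int) + 1) = ((s + 1 : Nat) : Int) by push_cast; ring]
    simp only [List.map_cons, Prod.swap_prod_mk, List.filter_cons]
    by_cases h : u = v
    · subst h
      simp only [beq_self_eq_true, if_true, List.map_cons]
      rw [ih, intsFrom_succ]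
      simp
    · have hb : (u == v) = false := by simp [h]
      simp only [hb, Bool.false_eq_true, if_false, if_neg h]
      rw [ih]
      simp [h]

lemma enum_filter (v : Int) : ∀ (rs : List (Int × Nat)) (s : Nat),
    ((((PySem.List.enumerate (rs.flatMap (fun p => List.replicate p.2 p.1)) (s : Int))).map
        Prod.swap).filter (fun p => p.1 == v)).map (fun p => p.2) = idxsOf v rs s := by
  intro rs
  induction rs with
  | nil => intro s; simp [idxsOf, PySem.List.enumerate_nil]
  | cons q rs ih =>
    intro s
    obtain ⟨u, k⟩ := q
    simp only [List.flatMap_cons]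
    rw [PySem.List.enumerate_append]
    simp only [List.map_append, List.filter_append, List.length_replicate]
    rw [show ((s : Int) + (k : Nat)) = ((s + k : Nat) : Int) by push_cast; ring]
    rw [ih]
    simp only [idxsOf]
    congr 1
    exact enum_rep v u k s

-- ---- Set facts ----

lemma set_update_replicate (s : PySem.Set Int) (u : Int) : ∀ (k : Nat), 1 ≤ k →
    PySem.Set.update s (List.replicate k u) = PySem.Set.add s u := by
  intro k
  induction k generalizing s with
  | zero => intro h; omega
  | succ k ih =>
    intro _
    rw [List.replicate_succ, PySem.Set.update_cons]
    cases Nat.eq_zero_or_pos k with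
    | inl h0 =>
      subst h0
      simp [PySem.Set.update]
    | inr h1 =>
      rw [ih (PySem.Set.add s u) h1]
      exact PySem.Set.add_of_mem (by rw [PySem.Set.mem_add]; right; rfl)

lemma set_update_flatten : ∀ (rs : List (Int × Nat)) (s : PySem.Set Int),
    (∀ p ∈ rs, 1 ≤ p.2) →
    PySem.Set.update s (rs.flatMap (fun p => List.replicate p.2 p.1))
      = PySem.Set.update s (rs.map (fun p => p.1)) := by
  intro rs
  induction rs with
  | nil => intro s _; simp
  | cons q rs ih =>
    intro s hpos
    obtain ⟨u, k⟩ := q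
    simp only [List.flatMap_cons, List.map_cons]
    rw [PySem.Set.update_append, PySem.Set.update_cons]
    rw [set_update_replicate s u k (hpos (u, k) (by simp))]
    exact ih (PySem.Set.add s u) (fun p hp => hpos p (by simp [hp]))

-- ---- the split lemma: pvSplit recovers the ranges from the position list ----

def pvStp (s : List (Int × Int) × Int × Int) (j : Int) : List (Int × Int) × Int × Int :=
  if j ≠ s.2.2 + 1 then (s.1 ++ [(s.2.1, s.2.2)], j, j) else (s.1, s.2.1, j)

def pvFin (s : List (Int × Int) × Int × Int) : List (Int × Int) := s.1 ++ [(s.2.1, s.2.2)]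

lemma pvSplit_cons (j0 : Int) (rest : List Int) :
    pvSplit (j0 :: rest) = pvFin (rest.foldl pvStp ([], j0, j0)) := rfl

lemma stp_consec : ∀ (k : Nat) (n : Nat) (acc : List (Int × Int)) (st p : Int),
    (n : Int) = p + 1 →
    List.foldl pvStp (acc, st, p) (intsFrom n k) = (acc, st, p + k) := by
  intro k
  induction k with
  | zero => intro n acc st p h; simp [intsFrom]
  | succ k ih =>
    intro n acc st p h
    rw [intsFrom_succ, List.foldl_cons]
    have hstep : pvStp (acc, st, p) ((n : Int)) = (acc, st, (n : Int)) := by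
      simp [pvStp, h]
    rw [hstep]
    rw [ih (n + 1) acc st (n : Int) (by push_cast; ring)]
    simp only [Prod.mk.injEq, true_and]
    omega

lemma split_main (v : Int) : ∀ (rs : List (Int × Nat)) (off : Nat) (acc : List (Int × Int))
    (st p : Int),
    rs.IsChain (fun a b => a.1 ≠ b.1) → (∀ q ∈ rs, 1 ≤ q.2) →
    (p ≤ (off : Int) - 2 ∨ (p ≤ (off : Int) - 1 ∧ (rs.head?.map (fun q => q.1)) ≠ some v)) →
    pvFin (List.foldl pvStp (acc, st, p) (idxsOf v rs off))
      = (acc ++ [(st, p)]) ++ rngsOf v rs off := by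
  intro rs
  induction rs with
  | nil => intro off acc st p _ _ _; simp [idxsOf, rngsOf, pvFin]
  | cons q rs ih =>
    intro off acc st p hch hpos hp
    obtain ⟨u, k⟩ := q
    have hk : 1 ≤ k := hpos (u, k) (by simp)
    by_cases hu : u = v
    · -- the head run belongs to v: close the pending range and open a new one
      subst hu
      have hp2 : p ≤ (off : Int) - 2 := by
        rcases hp with h | ⟨_, hh⟩
        · exact h
        · exfalso; apply hh; simp
      simp only [idxsOf, rngsOf, if_true]
      rw [List.foldl_append]
      obtain ⟨k', rfl⟩ : ∃ k', k = k' + 1 := ⟨k - 1, by omega⟩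
      rw [intsFrom_succ, List.foldl_cons]
      have hstep : pvStp (acc, st, p) ((off : Int))
          = (acc ++ [(st, p)], (off : Int), (off : Int)) := by
        have : ((off : Int)) ≠ p + 1 := by omega
        simp [pvStp, this]
      rw [hstep, stp_consec k' (off + 1) _ _ _ (by push_cast; ring)]
      rw [ih (off + (k' + 1)) (acc ++ [(st, p)]) ((off : Int)) ((off : Int) + (k' : Int))
        hch.tail (fun q hq => hpos q (by simp [hq])) ?_]
      · simp only [List.append_assoc, List.cons_append, List.nil_append]
        congr 3
        push_cast
        ring
      · right
        constructor
        · push_cast; omega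
        · cases hrs : rs with
          | nil => simp
          | cons q' rs' =>
            have h1 := hch.rel_head? (y := q') (by simp [hrs])
            simp only [List.head?_cons, Option.map_some]
            intro hc
            have h2 : q'.1 = u := by simpa using hc
            exact h1 h2.symm
    · -- the head run belongs to another value: nothing happens for v
      have hu' : ¬ (u = v) := hu
      simp only [idxsOf, rngsOf, if_neg hu', List.nil_append]
      rw [ih (off + k) acc st p hch.tail (fun q hq => hpos q (by simp [hq])) ?_]
      left
      rcases hp with h | ⟨h, _⟩
      · push_cast; omega
      · push_cast; omega

lemma split_top (v : Int) : ∀ (rs : List (Int × Nat)) (off : Nat),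
    rs.IsChain (fun a b => a.1 ≠ b.1) → (∀ q ∈ rs, 1 ≤ q.2) →
    pvSplit (idxsOf v rs off) = rngsOf v rs off := by
  intro rs
  induction rs with
  | nil => intro off _ _; simp [idxsOf, rngsOf, pvSplit]
  | cons q rs ih =>
    intro off hch hpos
    obtain ⟨u, k⟩ := q
    have hk : 1 ≤ k := hpos (u, k) (by simp)
    by_cases hu : u = v
    · subst hu
      simp only [idxsOf, rngsOf, if_true]
      obtain ⟨k', rfl⟩ : ∃ k', k = k' + 1 := ⟨k - 1, by omega⟩
      rw [intsFrom_succ]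
      rw [List.cons_append, pvSplit_cons]
      rw [List.foldl_append, stp_consec k' (off + 1) _ _ _ (by push_cast; ring)]
      rw [split_main u rs (off + (k' + 1)) [] ((off : Int)) ((off : Int) + (k' : Int))
        hch.tail (fun q hq => hpos q (by simp [hq])) ?_]
      · simp only [List.nil_append, List.cons_append]
        congr 3
        push_cast
        ring
      · right
        constructor
        · push_cast; omega
        · cases hrs : rs with
          | nil => simp
          | cons q' rs' =>
            have h1 := hch.rel_head? (y := q') (by simp [hrs])
            simp only [List.head?_cons, Option.map_some]
            intro hc
            have h2 : q'.1 = u := by simpa using hc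
            exact h1 h2.symm
    · simp only [idxsOf, rngsOf, if_neg hu, List.nil_append]
      exact ih (off + k) hch.tail (fun q hq => hpos q (by simp [hq]))

-- A's dict: items as a map over the distinct values in first-occurrence order
lemma A_items (xs : List Int) :
    ((pvRuns xs).foldl gB (PySem.Dict.empty, (0 : Int))).1.items
      = (PySem.Set.ofList xs).map (fun v => (v, rngsOf v (pvRuns xs) 0)) := by
  have h0 : (0 : Int) = ((0 : Nat) : Int) := by norm_num
  rw [h0]
  have hkeys : ((pvRuns xs).foldl gB (PySem.Dict.empty, ((0 : Nat) : Int))).1.keys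
      = PySem.Set.ofList xs := by
    rw [gBfold_keys, PySem.Dict.keys_empty]
    rw [show PySem.Set.update ([] : PySem.Set Int) ((pvRuns xs).map (fun p => p.1))
        = PySem.Set.update [] ((pvRuns xs).flatMap (fun p => List.replicate p.2 p.1)) from
      (set_update_flatten (pvRuns xs) [] (pvRuns_pos xs)).symm]
    rw [pvRuns_flatten, PySem.Set.update_nil_left]
  have hnodup : ((pvRuns xs).foldl gB (PySem.Dict.empty, ((0 : Nat) : Int))).1.keys.Nodup := by
    rw [hkeys]; exact PySem.Set.nodup_ofList xs
  rw [PySem.Dict.items_eq_map_keys _ hnodup [], hkeys]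
  apply List.map_congr_left
  intro v _
  rw [gBfold_getD, PySem.Dict.getD_empty]
  rfl

-- B's positions dict: each value's stored list is its index list
lemma B_getD (xs : List Int) (v : Int) :
    (pvPos xs).getD v [] = idxsOf v (pvRuns xs) 0 := by
  have h := enum_filter v (pvRuns xs) 0
  rw [pvRuns_flatten] at h
  simp only [Nat.cast_zero] at h
  rw [pvPos_getD]
  exact h

-- ===== VERDICT (by name: the statement is the Claim_ definition above) =====
theorem get_annotation_ranges_spec : Claim_equal_get_annotation_ranges := by
  intro xs _
  unfold Spec_get_annotation_ranges
  by_cases hnil : xs = []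
  · subst hnil
    rfl
  · have hnodupP : (pvPos xs).keys.Nodup := by
      rw [pvPos_keys]; exact PySem.Set.nodup_ofList xs
    have hB : get_annotation_ranges_alt xs
        = (pvPos xs).items.map (fun p => (p.1, pvSplit p.2)) := by
      show ((pvPos xs).items.foldl
          (fun (r : PySem.Dict Int (List (Int × Int))) p => r.insert p.1 (pvSplit p.2))
          PySem.Dict.empty).items = _
      rw [PySem.Dict.items_foldl_insert_fresh (pvPos xs).items (fun p => p.1)
        (fun p => pvSplit p.2) PySem.Dict.empty
        (fun p _ => PySem.Dict.contains_empty p.1) hnodupP]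
      rfl
    rw [A_runs xs hnil, hB, PySem.Dict.items_eq_map_keys (pvPos xs) hnodupP [],
      List.map_map, A_items, pvPos_keys]
    apply List.map_congr_left
    intro v _
    simp only [Function.comp_apply]
    rw [B_getD xs v, split_top v (pvRuns xs) 0 (pvRuns_chain xs) (pvRuns_pos xs)]
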